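-- pv_equiv track=rewrite | github.com/Iliyas-34/Restaurant-recommendation | restaurant-recommendation/utils/enhanced_ml_engine.py | _categorize_location
-- ===== SOURCE A (Python) =====
-- def _categorize_location(location):
--     """Categorize location types"""
--     if not location or location == 'Unknown':
--         return 'Unknown'
--
--     location_lower = location.lower()
--
--     if any(keyword in location_lower for keyword in ['mall', 'shopping', 'center']):
--         return 'Mall'
--     elif any(keyword in location_lower for keyword in ['street', 'road', 'avenue']):
--         return 'Street'
--     elif any(keyword in location_lower for keyword in ['hotel', 'resort']):
--         return 'Hotel'
--     elif any(keyword in location_lower for keyword in ['airport', 'station']):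
--         return 'Transport'
--     else:
--         return 'Other'
-- ===== SOURCE B (Python) =====
-- _KEYWORD_RANK = {
--     'mall': 0, 'shopping': 0, 'center': 0,
--     'street': 1, 'road': 1, 'avenue': 1,
--     'hotel': 2, 'resort': 2,
--     'airport': 3, 'station': 3,
-- }
-- _LABELS = ['Mall', 'Street', 'Hotel', 'Transport', 'Other']
--
--
-- def _categorize_location(location):
--     """Categorize location types: best (lowest) rank among all matching keywords."""
--     if not location or location == 'Unknown':
--         return 'Unknown'
--     loc = location.lower()
--     rank = min((r for kw, r in _KEYWORD_RANK.items() if kw in loc), default=4)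
--     return _LABELS[rank]
-- ===== Notes on version B (the rewrite author's own statement) =====
-- stated objective: alternative
-- what changed: Instead of an ordered if/elif chain with early return, B scans one flat keyword->rank dict, takes the minimum rank among all matching keywords, and indexes a label table (default rank 4 = 'Other'); correct because A returns the label of the lowest-indexed matching category.
import Mathlib
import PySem

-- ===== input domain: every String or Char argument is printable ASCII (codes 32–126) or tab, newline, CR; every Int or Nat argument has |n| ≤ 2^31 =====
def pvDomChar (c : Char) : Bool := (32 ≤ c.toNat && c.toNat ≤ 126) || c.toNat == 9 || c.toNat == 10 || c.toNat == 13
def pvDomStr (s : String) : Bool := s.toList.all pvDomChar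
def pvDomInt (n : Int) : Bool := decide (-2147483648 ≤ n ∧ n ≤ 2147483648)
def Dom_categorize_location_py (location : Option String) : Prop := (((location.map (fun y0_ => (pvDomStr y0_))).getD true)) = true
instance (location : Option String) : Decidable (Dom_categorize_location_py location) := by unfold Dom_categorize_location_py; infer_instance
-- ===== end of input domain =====

-- ===== PORT A =====
-- B computes the minimum category rank over one flat keyword->rank table instead of A's ordered if/elif chain (alternative algorithm, same cost).
def categorize_location_py (location : Option String) : String :=
  match location with
  | none => "Unknown"
  | some s =>
    if s = "" ∨ s = "Unknown" then "Unknown"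
    else
      let location_lower := PySem.Str.lower s
      if ["mall", "shopping", "center"].any (fun keyword => PySem.Str.isIn keyword location_lower) then "Mall"
      else if ["street", "road", "avenue"].any (fun keyword => PySem.Str.isIn keyword location_lower) then "Street"
      else if ["hotel", "resort"].any (fun keyword => PySem.Str.isIn keyword location_lower) then "Hotel"
      else if ["airport", "station"].any (fun keyword => PySem.Str.isIn keyword location_lower) then "Transport"
      else "Other"

-- ===== PORT B =====
def pvKeywordRank : List (String × Nat) :=
  [("mall", 0), ("shopping", 0), ("center", 0),
   ("street", 1), ("road", 1), ("avenue", 1),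
   ("hotel", 2), ("resort", 2),
   ("airport", 3), ("station", 3)]

def pvLabels : List String := ["Mall", "Street", "Hotel", "Transport", "Other"]

def categorize_location_py_alt (location : Option String) : String :=
  match location with
  | none => "Unknown"
  | some s =>
    if s = "" ∨ s = "Unknown" then "Unknown"
    else
      let loc := PySem.Str.lower s
      -- min over the matching ranks, default 4 (all ranks < 4, so folding from 4 is exact)
      let rank := pvKeywordRank.foldl (fun r p => if PySem.Str.isIn p.1 loc then Nat.min r p.2 else r) 4
      pvLabels.getD rank ""

-- ===== PRECONDITION & SPEC =====
def Spec_categorize_location_py (location : Option String) (out : String) : Prop := out = categorize_location_py_alt location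
instance (location : Option String) (out : String) : Decidable (Spec_categorize_location_py location out) := by unfold Spec_categorize_location_py; infer_instance

-- ===== CLAIM (what is proved, stated in full; the proofs are below) =====
def Claim_equal_categorize_location_py : Prop := ∀ (location : Option String), Dom_categorize_location_py location → Spec_categorize_location_py location (categorize_location_py location)

-- ===== LEMMAS AND PROOFS =====

-- the fold of B's port, written out on ten abstract match-bits
def pvRankOf (b1 b2 b3 b4 b5 b6 b7 b8 b9 b10 : Bool) : Nat :=
  let r1 := if b1 then Nat.min 4 0 else 4
  let r2 := if b2 then Nat.min r1 0 else r1
  let r3 := if b3 then Nat.min r2 0 else r2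
  let r4 := if b4 then Nat.min r3 1 else r3
  let r5 := if b5 then Nat.min r4 1 else r4
  let r6 := if b6 then Nat.min r5 1 else r5
  let r7 := if b7 then Nat.min r6 2 else r6
  let r8 := if b8 then Nat.min r7 2 else r7
  let r9 := if b9 then Nat.min r8 3 else r8
  if b10 then Nat.min r9 3 else r9

-- A's if/elif chain equals B's min-rank table lookup, for every combination of match-bits
theorem pvKey : ∀ (b1 b2 b3 b4 b5 b6 b7 b8 b9 b10 : Bool),
    (if (b1 || (b2 || (b3 || false))) then "Mall"
     else if (b4 || (b5 || (b6 || false))) then "Street"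
     else if (b7 || (b8 || false)) then "Hotel"
     else if (b9 || (b10 || false)) then "Transport"
     else "Other")
    = pvLabels.getD (pvRankOf b1 b2 b3 b4 b5 b6 b7 b8 b9 b10) "" := by
  decide

-- ===== VERDICT (by name: the statement is the Claim_ definition above) =====
theorem categorize_location_py_spec : Claim_equal_categorize_location_py := by
  intro location _
  unfold Spec_categorize_location_py categorize_location_py categorize_location_py_alt pvKeywordRank
  cases location with
  | none => rfl
  | some s =>
    by_cases hu : s = "" ∨ s = "Unknown"
    · simp [hu]
    · simp only [if_neg hu, List.any, List.foldl]
      exact pvKey _ _ _ _ _ _ _ _ _ _
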